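-- pv_equiv track=rewrite | github.com/jungle-5th/algorithm-study | 구자건/시간 초과, 부분오답/15686_치킨배달.py | find_chicken_range
-- ===== SOURCE A (Python) =====
-- def find_chicken_range(home_list, chicken_list, cur_chicken_list, n_chicken, index):
--     if len(cur_chicken_list) == n_chicken:
--         range_list = [10**9 for i in range(len(home_list))]
--         for i in range(n_chicken):
--             for j in range(len(home_list)):
--                 range_list[j] = min(range_list[j], abs(cur_chicken_list[i][0]-home_list[j][0])+abs(cur_chicken_list[i][1]-home_list[j][1]))
--         return sum(range_list)
--     min_sum_range = 10**9
--     for i in range(index, len(chicken_list)):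
--         next_chicken_list = cur_chicken_list.copy()
--         next_chicken_list.append(chicken_list[i])
--         min_sum_range = min(min_sum_range, find_chicken_range(home_list, chicken_list, next_chicken_list, n_chicken, i+1))
--
--     return min_sum_range
-- ===== SOURCE B (Python) =====
-- def find_chicken_range(home_list, chicken_list, cur_chicken_list, n_chicken, index):
--     INF = 10 ** 9
--     need = n_chicken - len(cur_chicken_list)
--     if need < 0:
--         return INF
--     dists = [INF] * len(home_list)
--     for c in cur_chicken_list:
--         dists = [min(d, abs(c[0] - h[0]) + abs(c[1] - h[1]))
--                  for d, h in zip(dists, home_list)]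
--
--     def go(pos, dists, k):
--         if k == 0:
--             return sum(dists)
--         if pos >= len(chicken_list):
--             return INF
--         c = chicken_list[pos]
--         taken = [min(d, abs(c[0] - h[0]) + abs(c[1] - h[1]))
--                  for d, h in zip(dists, home_list)]
--         return min(go(pos + 1, taken, k - 1), go(pos + 1, dists, k))
--
--     return go(index, dists, need)
-- ===== Notes on version B (the rewrite author's own statement) =====
-- stated objective: alternative
-- what changed: Replaced A's loop-and-recurse backtracking, which copies the chosen-subset list at every step and recomputes every home-to-chicken distance at every leaf, by an include/exclude recursion over candidate positions that maintains the per-home best-distance vector incrementally and returns 10**9 immediately when the selection is already over-full instead of exploring the whole remaining search tree.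
import Mathlib
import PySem

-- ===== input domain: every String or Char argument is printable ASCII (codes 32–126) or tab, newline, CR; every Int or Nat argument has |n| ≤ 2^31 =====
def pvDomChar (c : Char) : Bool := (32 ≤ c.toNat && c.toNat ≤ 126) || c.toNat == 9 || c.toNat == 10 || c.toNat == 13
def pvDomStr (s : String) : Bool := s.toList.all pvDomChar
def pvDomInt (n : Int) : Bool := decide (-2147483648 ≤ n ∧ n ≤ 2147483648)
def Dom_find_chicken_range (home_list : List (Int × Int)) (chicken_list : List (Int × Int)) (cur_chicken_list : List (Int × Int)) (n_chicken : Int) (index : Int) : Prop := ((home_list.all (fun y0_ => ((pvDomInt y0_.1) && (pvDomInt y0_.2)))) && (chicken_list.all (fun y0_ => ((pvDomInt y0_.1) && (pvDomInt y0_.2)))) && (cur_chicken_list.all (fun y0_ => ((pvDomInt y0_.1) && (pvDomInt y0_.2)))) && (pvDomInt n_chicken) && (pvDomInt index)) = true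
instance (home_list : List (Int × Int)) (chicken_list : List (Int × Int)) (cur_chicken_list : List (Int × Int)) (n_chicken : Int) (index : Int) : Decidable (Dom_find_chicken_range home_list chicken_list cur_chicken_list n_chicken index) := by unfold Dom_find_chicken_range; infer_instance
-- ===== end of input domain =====

-- B replaces A's loop-and-recurse backtracking (which carries the chosen-subset list and
-- recomputes all home distances at every leaf) by an include/exclude recursion over the
-- candidate positions that maintains the per-home best-distance vector incrementally and
-- rejects an over-full selection (need < 0) immediately. Return values agree on Pre_.

-- ===== PORT A =====
-- literal transliteration of A, made total with a fuel counter that the recursion provably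
-- never exhausts on Pre_ (each recursive call strictly increases index towards len(chicken_list));
-- the inner 'for j' loop, which takes a pointwise min into range_list, is rendered as the
-- equivalent zipWith over the same two lists.
def find_chicken_rangeF : Nat → List (Int × Int) → List (Int × Int) → List (Int × Int) → Int → Int → Int
  | 0, _, _, _, _, _ => 1000000000
  | fuel + 1, home_list, chicken_list, cur_chicken_list, n_chicken, index =>
    if (cur_chicken_list.length : Int) = n_chicken then
      ((PySem.List.pyRange 0 n_chicken 1).foldl
        (fun range_list i =>
          List.zipWith
            (fun r h =>
              min r (|(PySem.List.pyGetD cur_chicken_list i ((0 : Int), (0 : Int))).1 - h.1| +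
                     |(PySem.List.pyGetD cur_chicken_list i ((0 : Int), (0 : Int))).2 - h.2|))
            range_list home_list)
        ((PySem.List.pyRange 0 (home_list.length : Int) 1).map (fun _ => (1000000000 : Int)))).sum
    else
      (PySem.List.pyRange index (chicken_list.length : Int) 1).foldl
        (fun min_sum_range i =>
          min min_sum_range
            (find_chicken_rangeF fuel home_list chicken_list
              (cur_chicken_list ++ [PySem.List.pyGetD chicken_list i ((0 : Int), (0 : Int))])
              n_chicken (i + 1)))
        1000000000

def find_chicken_range (home_list : List (Int × Int)) (chicken_list : List (Int × Int)) (cur_chicken_list : List (Int × Int)) (n_chicken : Int) (index : Int) : Int :=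
  find_chicken_rangeF (((chicken_list.length : Int) - index).toNat + 1)
    home_list chicken_list cur_chicken_list n_chicken index

-- ===== PORT B =====
def fcrUpdate (home_list : List (Int × Int)) (dists : List Int) (c : Int × Int) : List Int :=
  List.zipWith (fun d h => min d (|c.1 - h.1| + |c.2 - h.2|)) dists home_list

-- B's include/exclude recursion, made total with the same provably sufficient fuel counter
def fcrGoF : Nat → List (Int × Int) → List (Int × Int) → Int → List Int → Int → Int
  | 0, _, _, _, _, _ => 1000000000
  | fuel + 1, home_list, chicken_list, pos, dists, k =>
    if k = 0 then dists.sum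
    else if (chicken_list.length : Int) ≤ pos then 1000000000
    else
      min
        (fcrGoF fuel home_list chicken_list (pos + 1)
          (fcrUpdate home_list dists (PySem.List.pyGetD chicken_list pos ((0 : Int), (0 : Int)))) (k - 1))
        (fcrGoF fuel home_list chicken_list (pos + 1) dists k)

def find_chicken_range_alt (home_list : List (Int × Int)) (chicken_list : List (Int × Int)) (cur_chicken_list : List (Int × Int)) (n_chicken : Int) (index : Int) : Int :=
  let need := n_chicken - (cur_chicken_list.length : Int)
  if need < 0 then 1000000000
  else
    fcrGoF (((chicken_list.length : Int) - index).toNat + 1) home_list chicken_list index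
      (cur_chicken_list.foldl (fun dists c => fcrUpdate home_list dists c)
        (List.replicate home_list.length (1000000000 : Int)))
      need

-- ===== PRECONDITION & SPEC =====
-- Pre_ excludes exactly the inputs on which A raises IndexError: when the recursive branch is
-- taken (len(cur_chicken_list) ≠ n_chicken) its loop reads chicken_list[index], which for
-- index < -len(chicken_list) is out of range even after Python's negative-index wraparound.
def Pre_find_chicken_range (home_list : List (Int × Int)) (chicken_list : List (Int × Int)) (cur_chicken_list : List (Int × Int)) (n_chicken : Int) (index : Int) : Prop :=
  (-(chicken_list.length : Int) ≤ index) ∨ ((cur_chicken_list.length : Int) = n_chicken)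
instance (home_list : List (Int × Int)) (chicken_list : List (Int × Int)) (cur_chicken_list : List (Int × Int)) (n_chicken : Int) (index : Int) : Decidable (Pre_find_chicken_range home_list chicken_list cur_chicken_list n_chicken index) := by unfold Pre_find_chicken_range; infer_instance

def pvWitness_find_chicken_range : (List (Int × Int)) × (List (Int × Int)) × (List (Int × Int)) × Int × Int :=
  ([(0, 0), (3, 4)], [(1, 1), (2, 5)], [], 1, 0)

def Spec_find_chicken_range (home_list : List (Int × Int)) (chicken_list : List (Int × Int)) (cur_chicken_list : List (Int × Int)) (n_chicken : Int) (index : Int) (out : Int) : Prop := out = find_chicken_range_alt home_list chicken_list cur_chicken_list n_chicken index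
instance (home_list : List (Int × Int)) (chicken_list : List (Int × Int)) (cur_chicken_list : List (Int × Int)) (n_chicken : Int) (index : Int) (out : Int) : Decidable (Spec_find_chicken_range home_list chicken_list cur_chicken_list n_chicken index out) := by unfold Spec_find_chicken_range; infer_instance

-- ===== CLAIM (what is proved, stated in full; the proofs are below) =====
def Claim_equal_find_chicken_range : Prop := ∀ (home_list : List (Int × Int)) (chicken_list : List (Int × Int)) (cur_chicken_list : List (Int × Int)) (n_chicken : Int) (index : Int), Dom_find_chicken_range home_list chicken_list cur_chicken_list n_chicken index → Pre_find_chicken_range home_list chicken_list cur_chicken_list n_chicken index → Spec_find_chicken_range home_list chicken_list cur_chicken_list n_chicken index (find_chicken_range home_list chicken_list cur_chicken_list n_chicken index)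

-- ===== LEMMAS AND PROOFS =====

-- abbreviation used only by the proofs: B's incrementally maintained distance vector
def fcrDists (home_list cur : List (Int × Int)) : List Int :=
  cur.foldl (fun dists c => fcrUpdate home_list dists c)
    (List.replicate home_list.length (1000000000 : Int))

-- pulling one element of a min-fold out in front
theorem fcr_foldl_min_out (g : Int → Int) (l : List Int) :
    ∀ a b : Int, l.foldl (fun x i => min x (g i)) (min a b) = min a (l.foldl (fun x i => min x (g i)) b) := by
  induction l with
  | nil => intro a b; simp
  | cons i t ih =>
      intro a b
      simp only [List.foldl_cons]
      rw [min_assoc, ih]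

-- A's base case equals the sum of B's distance vector
theorem fcr_F_base (fuel : Nat) (home_list chicken_list cur_chicken_list : List (Int × Int)) (n_chicken index : Int)
    (h : (cur_chicken_list.length : Int) = n_chicken) :
    find_chicken_rangeF (fuel + 1) home_list chicken_list cur_chicken_list n_chicken index =
      (fcrDists home_list cur_chicken_list).sum := by
  simp only [find_chicken_rangeF]
  rw [if_pos h, ← h]
  have hinit : (PySem.List.pyRange 0 (home_list.length : Int) 1).map (fun _ => (1000000000 : Int)) =
      List.replicate home_list.length (1000000000 : Int) := by
    rw [List.map_const', PySem.List.length_pyRange_one]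
    simp
  rw [hinit]
  unfold fcrDists
  rw [PySem.List.foldl_pyRange_zero_pyGetD' cur_chicken_list ((0 : Int), (0 : Int))
      (fun rl c =>
        List.zipWith (fun r h => min r (|c.1 - h.1| + |c.2 - h.2|)) rl home_list)
      (List.replicate home_list.length (1000000000 : Int))]
  rfl

-- A's else-branch
theorem fcr_F_not_base (fuel : Nat) (home_list chicken_list cur_chicken_list : List (Int × Int)) (n_chicken index : Int)
    (h : (cur_chicken_list.length : Int) ≠ n_chicken) :
    find_chicken_rangeF (fuel + 1) home_list chicken_list cur_chicken_list n_chicken index =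
      (PySem.List.pyRange index (chicken_list.length : Int) 1).foldl
        (fun acc i =>
          min acc
            (find_chicken_rangeF fuel home_list chicken_list
              (cur_chicken_list ++ [PySem.List.pyGetD chicken_list i ((0 : Int), (0 : Int))])
              n_chicken (i + 1)))
        1000000000 := by
  simp only [find_chicken_rangeF]
  rw [if_neg h]

-- A's else-branch on an empty range
theorem fcr_F_empty (fuel : Nat) (home_list chicken_list cur_chicken_list : List (Int × Int)) (n_chicken index : Int)
    (h : (cur_chicken_list.length : Int) ≠ n_chicken) (h2 : (chicken_list.length : Int) ≤ index) :
    find_chicken_rangeF (fuel + 1) home_list chicken_list cur_chicken_list n_chicken index = 1000000000 := by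
  rw [fcr_F_not_base fuel _ _ _ _ _ h, PySem.List.pyRange_one_eq_nil h2, List.foldl_nil]

-- A's else-branch, one loop step peeled off
theorem fcr_F_step (fuel : Nat) (home_list chicken_list cur_chicken_list : List (Int × Int)) (n_chicken index : Int)
    (h : (cur_chicken_list.length : Int) ≠ n_chicken) (h2 : index < (chicken_list.length : Int)) :
    find_chicken_rangeF (fuel + 1) home_list chicken_list cur_chicken_list n_chicken index =
      min
        (find_chicken_rangeF fuel home_list chicken_list
          (cur_chicken_list ++ [PySem.List.pyGetD chicken_list index ((0 : Int), (0 : Int))])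
          n_chicken (index + 1))
        (find_chicken_rangeF (fuel + 1) home_list chicken_list cur_chicken_list n_chicken (index + 1)) := by
  rw [fcr_F_not_base fuel _ _ _ _ _ h, fcr_F_not_base fuel _ _ _ _ _ h,
    PySem.List.pyRange_one_cons h2, List.foldl_cons, min_comm (1000000000 : Int),
    fcr_foldl_min_out]

-- with enough fuel the result does not depend on the exact fuel value
theorem fcr_F_irrel (home_list chicken_list : List (Int × Int)) (n_chicken : Int) :
    ∀ (f1 f2 : Nat) (index : Int) (cur_chicken_list : List (Int × Int)),
      ((chicken_list.length : Int) - index).toNat < f1 →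
      ((chicken_list.length : Int) - index).toNat < f2 →
      find_chicken_rangeF f1 home_list chicken_list cur_chicken_list n_chicken index =
        find_chicken_rangeF f2 home_list chicken_list cur_chicken_list n_chicken index := by
  intro f1
  induction f1 with
  | zero => intro f2 index cur h1 h2; omega
  | succ m ih =>
      intro f2 index cur h1 h2
      match f2, h2 with
      | m2 + 1, h2 =>
        by_cases hb : (cur.length : Int) = n_chicken
        · rw [fcr_F_base m _ _ _ _ _ hb, fcr_F_base m2 _ _ _ _ _ hb]
        · by_cases hlt : index < (chicken_list.length : Int)
          · rw [fcr_F_step m _ _ _ _ _ hb hlt, fcr_F_step m2 _ _ _ _ _ hb hlt,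
              ih m2 (index + 1) _ (by omega) (by omega),
              ← ih (m2 + 1) (index + 1) cur (by omega) (by omega),
              ih (m + 1) (index + 1) cur (by omega) (by omega)]
          · rw [fcr_F_empty m _ _ _ _ _ hb (by omega), fcr_F_empty m2 _ _ _ _ _ hb (by omega)]

-- A returns 10**9 whenever the current selection is already over-full
theorem fcr_F_overfull (home_list chicken_list : List (Int × Int)) (n_chicken : Int) :
    ∀ (fuel : Nat) (index : Int) (cur_chicken_list : List (Int × Int)),
      ((chicken_list.length : Int) - index).toNat < fuel →
      -(chicken_list.length : Int) ≤ index →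
      n_chicken < (cur_chicken_list.length : Int) →
      find_chicken_rangeF fuel home_list chicken_list cur_chicken_list n_chicken index = 1000000000 := by
  intro fuel
  induction fuel with
  | zero => intro index cur h hlo hn; omega
  | succ m ih =>
      intro index cur h hlo hn
      by_cases hlt : index < (chicken_list.length : Int)
      · rw [fcr_F_step m _ _ _ _ _ (by omega) hlt,
          fcr_F_irrel home_list chicken_list n_chicken (m + 1) m (index + 1) cur (by omega) (by omega),
          ih (index + 1) _ (by omega) (by omega) (by simp; omega),
          ih (index + 1) cur (by omega) (by omega) hn, min_self]
      · exact fcr_F_empty m _ _ _ _ _ (by omega) (by omega)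

-- main invariant: A's backtracking equals B's include/exclude recursion, at the same fuel
theorem fcr_main (home_list chicken_list : List (Int × Int)) (n_chicken : Int) :
    ∀ (fuel : Nat) (index : Int) (cur_chicken_list : List (Int × Int)),
      ((chicken_list.length : Int) - index).toNat < fuel →
      ((cur_chicken_list.length : Int) = n_chicken ∨ -(chicken_list.length : Int) ≤ index) →
      (cur_chicken_list.length : Int) ≤ n_chicken →
      find_chicken_rangeF fuel home_list chicken_list cur_chicken_list n_chicken index =
        fcrGoF fuel home_list chicken_list index (fcrDists home_list cur_chicken_list)
          (n_chicken - (cur_chicken_list.length : Int)) := by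
  intro fuel
  induction fuel with
  | zero => intro index cur h hpre hle; omega
  | succ m ih =>
      intro index cur h hpre hle
      by_cases hb : (cur.length : Int) = n_chicken
      · rw [fcr_F_base m _ _ _ _ _ hb]
        simp only [fcrGoF]
        rw [if_pos (by omega)]
      · by_cases hlt : index < (chicken_list.length : Int)
        · have hlo : -(chicken_list.length : Int) ≤ index := by
            rcases hpre with h' | h'
            · exact absurd h' hb
            · exact h'
          rw [fcr_F_step m _ _ _ _ _ hb hlt,
            fcr_F_irrel home_list chicken_list n_chicken (m + 1) m (index + 1) cur (by omega) (by omega)]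
          have hd : fcrDists home_list
              (cur ++ [PySem.List.pyGetD chicken_list index ((0 : Int), (0 : Int))]) =
              fcrUpdate home_list (fcrDists home_list cur)
                (PySem.List.pyGetD chicken_list index ((0 : Int), (0 : Int))) := by
            unfold fcrDists
            rw [List.foldl_append, List.foldl_cons, List.foldl_nil]
          have hk : n_chicken -
              ((cur ++ [PySem.List.pyGetD chicken_list index ((0 : Int), (0 : Int))]).length : Int) =
              n_chicken - (cur.length : Int) - 1 := by
            simp [List.length_append]
            ring
          rw [ih (index + 1) (cur ++ [PySem.List.pyGetD chicken_list index ((0 : Int), (0 : Int))])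
              (by omega) (Or.inr (by omega)) (by simp; omega),
            ih (index + 1) cur (by omega) (Or.inr (by omega)) hle, hd, hk]
          simp only [fcrGoF]
          rw [if_neg (by omega), if_neg (by omega)]
        · rw [fcr_F_empty m _ _ _ _ _ hb (by omega)]
          simp only [fcrGoF]
          rw [if_neg (by omega), if_pos (by omega)]

-- ===== VERDICT (by name: the statement is the Claim_ definition above) =====
theorem find_chicken_range_spec : Claim_equal_find_chicken_range := by
  intro home_list chicken_list cur_chicken_list n_chicken index hDom hPre
  unfold Spec_find_chicken_range find_chicken_range_alt find_chicken_range
  by_cases hlt : n_chicken - (cur_chicken_list.length : Int) < 0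
  · simp only [if_pos hlt]
    rcases hPre with hlo | hbase
    · exact fcr_F_overfull home_list chicken_list n_chicken
        (((chicken_list.length : Int) - index).toNat + 1) index cur_chicken_list
        (Nat.lt_succ_self _) hlo (by omega)
    · omega
  · simp only [if_neg hlt]
    exact fcr_main home_list chicken_list n_chicken
      (((chicken_list.length : Int) - index).toNat + 1) index cur_chicken_list
      (Nat.lt_succ_self _) (Or.symm hPre) (by omega)
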